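-- pv_equiv track=rewrite | github.com/daniel122134/chessBot | backend/src/hal/WizardsChessController.py | get_smallest_list
-- ===== SOURCE A (Python) =====
-- def get_smallest_list(lists):
--     not_empty_lists = [item for item in lists.values() if item != []]
--     min_index = 0
--     min_len = len(not_empty_lists[min_index])
--     for i in range(1, len(not_empty_lists)):
--         if len(not_empty_lists[i]) < min_len:
--             min_len = len(not_empty_lists[i])
--             min_index = i
--     return not_empty_lists[min_index]
-- ===== SOURCE B (Python) =====
-- def get_smallest_list(lists):
--     not_empty_lists = [item for item in lists.values() if item != []]
--     return sorted(not_empty_lists, key=len)[0]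
-- ===== Notes on version B (the rewrite author's own statement) =====
-- stated objective: idiomatic
-- what changed: replaces the hand-written index-tracking minimum scan with sorted(not_empty_lists, key=len)[0], relying on sort stability for the first-minimum tie-break
-- outside the precondition, e.g. on get_smallest_list({}): A raises IndexError, B raises IndexError; on get_smallest_list({'a': [], 'b': []}): A raises IndexError, B raises IndexError
import Mathlib
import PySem

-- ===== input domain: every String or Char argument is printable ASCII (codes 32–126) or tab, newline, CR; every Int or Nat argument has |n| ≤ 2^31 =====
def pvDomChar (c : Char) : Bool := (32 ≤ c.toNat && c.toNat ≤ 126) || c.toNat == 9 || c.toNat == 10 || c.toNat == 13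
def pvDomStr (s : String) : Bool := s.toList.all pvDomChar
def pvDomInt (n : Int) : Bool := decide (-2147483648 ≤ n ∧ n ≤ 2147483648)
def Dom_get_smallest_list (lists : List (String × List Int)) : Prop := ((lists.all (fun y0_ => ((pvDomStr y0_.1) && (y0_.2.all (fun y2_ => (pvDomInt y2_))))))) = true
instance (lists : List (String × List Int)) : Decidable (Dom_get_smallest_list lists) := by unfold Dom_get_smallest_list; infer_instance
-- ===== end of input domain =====

-- B replaces A's index-tracking minimum scan with sorted(…, key=len)[0]; same return value, no speed claim.

-- ===== PORT A =====
def get_smallest_list (lists : List (String × List Int)) : List Int :=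
  let ne := (lists.map Prod.snd).filter (fun item => decide (item ≠ []))
  let min_len : Int := ((PySem.List.pyGetD ne 0 []).length : Int)
  let st := (PySem.List.pyRange 1 (ne.length : Int)).foldl
    (fun (s : Int × Int) i =>
      if ((PySem.List.pyGetD ne i []).length : Int) < s.2 then
        (i, ((PySem.List.pyGetD ne i []).length : Int))
      else s) (0, min_len)
  PySem.List.pyGetD ne st.1 []

-- ===== PORT B =====
def get_smallest_list_alt (lists : List (String × List Int)) : List Int :=
  let ne := (lists.map Prod.snd).filter (fun item => decide (item ≠ []))
  PySem.List.pyGetD (PySem.List.sorted ne (fun l => (l.length : Int))) 0 []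

-- ===== PRECONDITION & SPEC =====
-- Pre_ excludes inputs where every dict value is [] (then not_empty_lists is empty and A raises IndexError).
def Pre_get_smallest_list (lists : List (String × List Int)) : Prop :=
  ∃ p ∈ lists, p.2 ≠ []
instance (lists : List (String × List Int)) : Decidable (Pre_get_smallest_list lists) := by
  unfold Pre_get_smallest_list; infer_instance

def pvWitness_get_smallest_list : (List (String × List Int)) := [("a", [1])]

def Spec_get_smallest_list (lists : List (String × List Int)) (out : List Int) : Prop := out = get_smallest_list_alt lists
instance (lists : List (String × List Int)) (out : List Int) : Decidable (Spec_get_smallest_list lists out) := by unfold Spec_get_smallest_list; infer_instance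

-- ===== CLAIM (what is proved, stated in full; the proofs are below) =====
def Claim_equal_get_smallest_list : Prop := ∀ (lists : List (String × List Int)), Dom_get_smallest_list lists → Pre_get_smallest_list lists → Spec_get_smallest_list lists (get_smallest_list lists)

-- ===== LEMMAS AND PROOFS =====

-- first element of minimal length, scanning left to right with current candidate `cur`
def fmAux : List Int → List (List Int) → List Int
  | cur, [] => cur
  | cur, x :: t => fmAux (if x.length < cur.length then x else cur) t

-- A's index loop computes fmAux
theorem scanA (ne : List (List Int)) :
    ∀ (n j : Nat) (cur : List Int) (mi : Int), n = ne.length - j →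
      PySem.List.pyGetD ne mi [] = cur →
      PySem.List.pyGetD ne
        (((PySem.List.pyRange (j : Int) (ne.length : Int)).foldl
          (fun (s : Int × Int) i =>
            if ((PySem.List.pyGetD ne i []).length : Int) < s.2 then
              (i, ((PySem.List.pyGetD ne i []).length : Int))
            else s) (mi, (cur.length : Int))).1) []
      = fmAux cur (ne.drop j) := by
  intro n
  induction n with
  | zero =>
    intro j cur mi hn hcur
    have hj : ne.length ≤ j := by omega
    have hr : PySem.List.pyRange (j : Int) (ne.length : Int) = [] := by
      rw [PySem.List.pyRange_one]
      have : ((ne.length : Int) - (j : Int)).toNat = 0 := by omega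
      simp [this]
    rw [hr]
    simp [List.drop_eq_nil_of_le hj, fmAux, hcur]
  | succ m ih =>
    intro j cur mi hn hcur
    have hj : j < ne.length := by omega
    have hlt : (j : Int) < (ne.length : Int) := by exact_mod_cast hj
    rw [PySem.List.pyRange_one_cons hlt]
    have hget : PySem.List.pyGetD ne (j : Int) [] = ne[j] :=
      PySem.List.pyGetD_eq_getElem ne [] (by positivity) (by exact_mod_cast hj) |>.trans (by simp)
    have hdrop : ne.drop j = ne[j] :: ne.drop (j + 1) := List.drop_eq_getElem_cons hj
    rw [List.foldl_cons, hdrop]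
    by_cases hc : ne[j].length < cur.length
    · have hc' : ((PySem.List.pyGetD ne (j:Int) []).length : Int) < (cur.length : Int) := by
        rw [hget]; exact_mod_cast hc
      rw [if_pos hc', hget]
      have := ih (j + 1) ne[j] (j : Int) (by omega) hget
      push_cast at this ⊢
      rw [this]
      simp [fmAux, hc]
    · have hc' : ¬ ((PySem.List.pyGetD ne (j:Int) []).length : Int) < (cur.length : Int) := by
        rw [hget]; exact_mod_cast hc
      rw [if_neg hc']
      have := ih (j + 1) cur mi (by omega) hcur
      push_cast at this ⊢
      rw [this]
      simp [fmAux, hc]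

-- head of the stable insertion-sort fold is fmAux of the accumulator's head
theorem foldIns :
    ∀ (xs : List (List Int)) (acc : List (List Int)) (a : List Int), acc.head? = some a →
      (xs.foldl (fun acc x =>
          PySem.List.insertBy (fun p q => decide (((p.length : Int)) < ((q.length : Int)))) x acc) acc).head?
        = some (fmAux a xs) := by
  intro xs
  induction xs with
  | nil => intro acc a ha; simpa [fmAux] using ha
  | cons x t ih =>
    intro acc a ha
    obtain ⟨rest, rfl⟩ : ∃ rest, acc = a :: rest := by
      cases acc with
      | nil => simp at ha
      | cons b r => simp at ha; exact ⟨r, by rw [ha]⟩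
    rw [List.foldl_cons]
    by_cases hc : x.length < a.length
    · have : PySem.List.insertBy (fun p q => decide (((p.length : Int)) < ((q.length : Int)))) x (a :: rest)
          = x :: a :: rest := by
        simp only [PySem.List.insertBy]
        rw [if_pos (by simp; exact_mod_cast hc)]
      rw [this, ih _ x (by simp)]
      simp [fmAux, hc]
    · have : PySem.List.insertBy (fun p q => decide (((p.length : Int)) < ((q.length : Int)))) x (a :: rest)
          = a :: PySem.List.insertBy (fun p q => decide (((p.length : Int)) < ((q.length : Int)))) x rest := by
        simp only [PySem.List.insertBy]
        rw [if_neg (by simp; omega)]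
      rw [this, ih _ a (by simp)]
      simp [fmAux, hc]

theorem ne_nonempty (lists : List (String × List Int)) (h : Pre_get_smallest_list lists) :
    ∃ c rest, (lists.map Prod.snd).filter (fun item => decide (item ≠ [])) = c :: rest := by
  obtain ⟨p, hp, hne⟩ := h
  have hmem : p.2 ∈ (lists.map Prod.snd).filter (fun item => decide (item ≠ [])) := by
    simp only [List.mem_filter, List.mem_map]
    exact ⟨⟨p, hp, rfl⟩, by simpa using hne⟩
  cases hfe : (lists.map Prod.snd).filter (fun item => decide (item ≠ [])) with
  | nil => rw [hfe] at hmem; simp at hmem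
  | cons c rest => exact ⟨c, rest, rfl⟩

-- ===== VERDICT (by name: the statement is the Claim_ definition above) =====
theorem get_smallest_list_spec : Claim_equal_get_smallest_list := by
  intro lists _ hpre
  unfold Spec_get_smallest_list get_smallest_list get_smallest_list_alt
  obtain ⟨c, rest, hfe⟩ := ne_nonempty lists hpre
  simp only [hfe]
  -- A side
  have hc0 : PySem.List.pyGetD (c :: rest) (0:Int) [] = c := by
    simp [PySem.List.pyGetD_zero_cons]
  have hA := scanA (c :: rest) ((c :: rest).length - 1) 1 c 0 rfl hc0
  simp only [List.drop_succ_cons, List.drop_zero] at hA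
  norm_num at hA ⊢
  rw [hA]
  -- B side
  have hB := foldIns rest [c] c (by simp)
  have hsorted : PySem.List.sorted (c :: rest) (fun l => ((l.length : Int))) =
      (rest.foldl (fun acc x =>
        PySem.List.insertBy (fun p q => decide (((p.length : Int)) < ((q.length : Int)))) x acc) [c]) := by
    rw [PySem.List.sorted_eq_foldl_insertBy]
    simp [PySem.List.insertBy]
  rw [hsorted]
  obtain ⟨tl, htl⟩ : ∃ tl, (rest.foldl (fun acc x =>
      PySem.List.insertBy (fun p q => decide (((p.length : Int)) < ((q.length : Int)))) x acc) [c])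
      = fmAux c rest :: tl := by
    cases hfl : (rest.foldl (fun acc x =>
        PySem.List.insertBy (fun p q => decide (((p.length : Int)) < ((q.length : Int)))) x acc) [c]) with
    | nil => rw [hfl] at hB; simp at hB
    | cons b r => rw [hfl] at hB; simp at hB; exact ⟨r, by rw [hB]⟩
  rw [htl]
  simp [PySem.List.pyGetD_zero_cons]
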